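-- pv_equiv track=rewrite | github.com/JUKOMU/zhenxun_bot_plugins_jukomu_dev | jmcomic_tool/jmcomic_search/__init__.py | parse_search_terms
-- ===== SOURCE A (Python) =====
-- def parse_search_terms(search_str: str):
--     """
--     解析搜索字符串，返回包含项列表和排除项列表
--
--     参数:
--         search_str: 格式为"term1[+/-]term2[+/-]term3[+/-]term4[+/-]..."的字符串
--
--     返回:
--         包含元组: (包含列表, 排除列表)
--     """
--     include_terms = []
--     exclude_terms = []
--
--     if not search_str:
--         return include_terms, exclude_terms
--
--     """
--     先按减号分割字符串
--     分隔结果为两种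
--     1. 单字符串, 该字符串原来被夹在两个“-”间
--     2. 含“+”号字符串
--     一定不会有含“-”的字符串
--     对于第二种字符串, 可以确定再次分隔后的第一个字符串为“-”后的字符串
--     """
--
--     first_str = ""
--     rest_str = ""
--     flag = True
--     for c in search_str:
--         if c == '+' or c == '-':
--             flag = False
--         if flag:
--             first_str += c
--         else:
--             rest_str += c
--
--     include_terms.append(first_str)
--
--     parts = rest_str.split('-')
--
--     for part in parts:
--         index = part.find("+")
--         if index == -1:
--             # 这是排除字符串
--             if len(part) > 0:
--                 exclude_terms.append(part)
--         else:
--             # 再次分隔字符串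
--             part_subs = part.split("+")
--             if len(part_subs[0]) > 0:
--                 exclude_terms.append(part_subs[0])
--             # 剩余为包含字符串
--             for sub in part_subs[1:]:
--                 include_terms.append(sub)
--
--     return include_terms, exclude_terms
-- ===== SOURCE B (Python) =====
-- def parse_search_terms(search_str: str):
--     include_terms = []
--     exclude_terms = []
--     if not search_str:
--         return include_terms, exclude_terms
--     token = ""
--     is_exclude = False
--     for c in search_str:
--         if c == '+' or c == '-':
--             if is_exclude:
--                 if token:
--                     exclude_terms.append(token)
--             else:
--                 include_terms.append(token)
--             token = ""
--             is_exclude = (c == '-')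
--         else:
--             token += c
--     if is_exclude:
--         if token:
--             exclude_terms.append(token)
--     else:
--         include_terms.append(token)
--     return include_terms, exclude_terms
-- ===== Notes on version B (the rewrite author's own statement) =====
-- stated objective: simpler
-- what changed: Replaces A's three-phase pipeline (prefix-extraction loop, split on '-', then find/split on '+' per part) by one left-to-right character scan with a token buffer and an include/exclude flag, flushing at each delimiter.
import Mathlib
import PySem

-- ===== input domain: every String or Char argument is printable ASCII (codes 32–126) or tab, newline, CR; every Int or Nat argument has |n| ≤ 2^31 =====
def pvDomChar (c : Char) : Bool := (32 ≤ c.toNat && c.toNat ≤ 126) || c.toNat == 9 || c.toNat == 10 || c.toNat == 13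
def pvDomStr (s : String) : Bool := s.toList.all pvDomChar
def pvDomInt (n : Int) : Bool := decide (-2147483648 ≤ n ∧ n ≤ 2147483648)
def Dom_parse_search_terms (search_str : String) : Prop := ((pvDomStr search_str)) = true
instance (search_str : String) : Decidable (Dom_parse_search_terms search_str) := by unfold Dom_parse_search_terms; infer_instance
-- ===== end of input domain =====

-- B replaces A's three-phase pipeline (prefix loop, split on '-', then find/split on '+' per part)
-- by one left-to-right character scan with a token buffer and an include/exclude flag: simpler, same cost.

-- ===== PORT A =====
-- Literal port of A over search_str.toList (strings handled as List Char, exact on the domain).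
-- body of A's first loop (build first_str / rest_str with the flag)
def pvPhase1Step (st : List Char × List Char × Bool) (c : Char) : List Char × List Char × Bool :=
  let flag := if c == '+' || c == '-' then false else st.2.2
  if flag then (st.1 ++ [c], st.2.1, flag) else (st.1, st.2.1 ++ [c], flag)

-- body of A's second loop ("for part in parts")
def pvPartStep (acc : List String × List String) (part : List Char) : List String × List String :=
  let index := PySem.Chars.find part ['+']
  if index == -1 then
    if part.length > 0 then (acc.1, acc.2 ++ [String.ofList part]) else acc
  else
    let part_subs := PySem.Chars.splitOn part ['+']
    -- part_subs[0]: splitOn never returns [], so headD is exact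
    let exc := if (part_subs.headD []).length > 0 then acc.2 ++ [String.ofList (part_subs.headD [])] else acc.2
    (acc.1 ++ (PySem.List.slice part_subs (some 1) none).map String.ofList, exc)

def parse_search_terms (search_str : String) : List String × List String :=
  if search_str = "" then ([], []) else
  let st := search_str.toList.foldl pvPhase1Step ([], [], true)
  let parts := PySem.Chars.splitOn st.2.1 ['-']
  parts.foldl pvPartStep ([String.ofList st.1], [])

-- ===== PORT B =====
-- the scan loop of Source B: token buffer, is_exclude flag, flush at each delimiter and at the end
def pvScan : List Char → List Char → Bool → List String → List String → List String × List String
  | [], tok, isExc, inc, exc =>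
      if isExc then (inc, if tok.length > 0 then exc ++ [String.ofList tok] else exc)
      else (inc ++ [String.ofList tok], exc)
  | c :: cs, tok, isExc, inc, exc =>
      if c == '+' || c == '-' then
        if isExc then pvScan cs [] (c == '-') inc (if tok.length > 0 then exc ++ [String.ofList tok] else exc)
        else pvScan cs [] (c == '-') (inc ++ [String.ofList tok]) exc
      else pvScan cs (tok ++ [c]) isExc inc exc

def parse_search_terms_alt (search_str : String) : List String × List String :=
  if search_str = "" then ([], [])
  else pvScan search_str.toList [] false [] []

-- ===== PRECONDITION & SPEC =====
def Spec_parse_search_terms (search_str : String) (out : List String × List String) : Prop := out = parse_search_terms_alt search_str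
instance (search_str : String) (out : List String × List String) : Decidable (Spec_parse_search_terms search_str out) := by unfold Spec_parse_search_terms; infer_instance

-- ===== CLAIM (what is proved, stated in full; the proofs are below) =====
def Claim_equal_parse_search_terms : Prop := ∀ (search_str : String), Dom_parse_search_terms search_str → Spec_parse_search_terms search_str (parse_search_terms search_str)

-- ===== LEMMAS AND PROOFS =====

-- characters that stay inside a token (neither '+' nor '-')
def pvKeep (c : Char) : Bool := !(c == '+' || c == '-')

-- reference single-character splitter: mysplit d l = Python l.split(d)
def mysplit (d : Char) : List Char → List (List Char)
  | [] => [[]]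
  | c :: cs => if c = d then [] :: mysplit d cs else (mysplit d cs).modifyHead (c :: ·)

theorem mysplit_cons (d : Char) (l : List Char) : ∃ h t, mysplit d l = h :: t := by
  induction l with
  | nil => exact ⟨[], [], rfl⟩
  | cons c cs ih =>
    obtain ⟨h, t, hht⟩ := ih
    by_cases hc : c = d
    · exact ⟨[], mysplit d cs, by simp [mysplit, hc]⟩
    · exact ⟨c :: h, t, by simp [mysplit, hc, hht]⟩

theorem splitOn_go_eq (d : Char) (fuel : Nat) (l cur : List Char) (acc : List (List Char))
    (hf : l.length ≤ fuel) :
    PySem.Chars.splitOn.go [d] fuel l cur acc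
      = acc.reverse ++ (mysplit d l).modifyHead (cur.reverse ++ ·) := by
  induction fuel generalizing l cur acc with
  | zero =>
    have : l = [] := List.length_eq_zero_iff.1 (Nat.le_zero.1 hf)
    subst this
    simp [PySem.Chars.splitOn.go, mysplit]
  | succ n ih =>
    cases l with
    | nil => simp [PySem.Chars.splitOn.go, mysplit]
    | cons c rest =>
      rw [PySem.Chars.splitOn.go]
      have hlen : rest.length ≤ n := by simpa using hf
      by_cases hc : c = d
      · rw [if_pos (by simp [List.isPrefixOf, hc])]
        have hd : List.drop [d].length (c :: rest) = rest := by simp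
        rw [hd, ih rest [] (cur.reverse :: acc) hlen]
        obtain ⟨h, t, hht⟩ := mysplit_cons d rest
        simp [mysplit, hc, hht]
      · rw [if_neg (by simp [List.isPrefixOf, Ne.symm hc])]
        rw [ih rest (c :: cur) acc hlen]
        obtain ⟨h, t, hht⟩ := mysplit_cons d rest
        simp [mysplit, hc, hht]

theorem splitOn_eq (d : Char) (l : List Char) :
    PySem.Chars.splitOn l [d] = mysplit d l := by
  obtain ⟨h, t, hht⟩ := mysplit_cons d l
  simp [PySem.Chars.splitOn, splitOn_go_eq d (l.length + 1) l [] [] (by omega), hht]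

-- splitting a string with a delimiter-free prefix prepends the prefix to the first part
theorem mysplit_append (d : Char) (t l : List Char) (hd : d ∉ t) :
    mysplit d (t ++ l) = (mysplit d l).modifyHead (t ++ ·) := by
  obtain ⟨h, tl, hht⟩ := mysplit_cons d l
  induction t with
  | nil => simp [hht]
  | cons c t' ih =>
    have hc : c ≠ d := by rintro rfl; exact hd List.mem_cons_self
    have ih' := ih (fun hm => hd (List.mem_cons_of_mem _ hm))
    simp [mysplit, hc, ih', hht]

-- the branch test of A: find(part, '+') == -1 iff '+' not in part
theorem find_plus_eq_neg_one (part : List Char) :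
    (PySem.Chars.find part ['+'] == (-1 : Int)) = !(decide ('+' ∈ part)) := by
  by_cases h : '+' ∈ part
  · obtain ⟨s, t, hst⟩ := List.mem_iff_append.1 h
    have : ['+'] <:+: part := ⟨s, t, by simp [hst]⟩
    have := (PySem.Chars.find_ne_neg_one_iff part ['+']).2 this
    simp [h, this]
  · have hni : ¬ (['+'] <:+: part) := fun hin => h (List.singleton_sublist.1 hin.sublist)
    have := (PySem.Chars.find_eq_neg_one_iff part ['+']).2 hni
    simp [h, this]

-- the exclude-flush both programs perform
def flushE (exc : List String) (t : List Char) : List String :=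
  if t.length > 0 then exc ++ [String.ofList t] else exc

-- A's per-part step rewritten through mysplit and membership
def mystep (acc : List String × List String) (part : List Char) : List String × List String :=
  if '+' ∈ part then
    (acc.1 ++ ((mysplit '+' part).tail).map String.ofList, flushE acc.2 ((mysplit '+' part).headD []))
  else (acc.1, flushE acc.2 part)

theorem partStep_eq : pvPartStep = mystep := by
  funext acc part
  obtain ⟨i, e⟩ := acc
  simp only [pvPartStep, mystep, find_plus_eq_neg_one, splitOn_eq, flushE]
  by_cases h : '+' ∈ part
  · obtain ⟨h0, t0, hht⟩ := mysplit_cons '+' part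
    simp [h, hht, PySem.List.slice_from]
  · by_cases hl : 0 < part.length <;> simp [h, hl]

-- first loop of A, once the flag has fallen: everything goes to rest_str
theorem phase1_false (cs : List Char) (f r : List Char) :
    cs.foldl pvPhase1Step (f, r, false) = (f, r ++ cs, false) := by
  induction cs generalizing r with
  | nil => simp
  | cons c cs ih => simp [pvPhase1Step, ih]

-- first loop of A: first_str = the pvKeep-prefix, rest_str = the remainder
theorem phase1_spec (cs : List Char) (f : List Char) :
    cs.foldl pvPhase1Step (f, [], true)
      = (f ++ cs.takeWhile pvKeep, cs.dropWhile pvKeep, cs.all pvKeep) := by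
  induction cs generalizing f with
  | nil => simp
  | cons c cs ih =>
    by_cases hc : pvKeep c = true
    · have hc' : (c == '+' || c == '-') = false := by simpa [pvKeep] using hc
      simp [List.foldl_cons, pvPhase1Step, hc', ih, hc]
    · have hcb : pvKeep c = false := by simpa using hc
      have hc' : (c == '+' || c == '-') = true := by revert hcb; simp [pvKeep]; tauto
      simp [List.foldl_cons, pvPhase1Step, hc', phase1_false, hcb]

-- tokens never contain a delimiter
theorem keep_not_plus (tok : List Char) (h : ∀ c ∈ tok, pvKeep c = true) : '+' ∉ tok := by
  intro hm; have := h _ hm; simp [pvKeep] at this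

-- the central invariant: A's per-part fold over the '-'-split equals B's scan,
-- in exclude mode (E) and in include mode (I), for any delimiter-free partial token
theorem scanEI (cs : List Char) : ∀ tok inc exc, (∀ c ∈ tok, pvKeep c = true) →
    (List.foldl mystep (inc, exc) ((mysplit '-' cs).modifyHead (tok ++ ·)) = pvScan cs tok true inc exc)
    ∧ (List.foldl mystep
        (inc ++ ((mysplit '+' ((mysplit '-' cs).headD [])).modifyHead (tok ++ ·)).map String.ofList, exc)
        ((mysplit '-' cs).tail) = pvScan cs tok false inc exc) := by
  induction cs with
  | nil =>
    intro tok inc exc htok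
    constructor
    · simp [mysplit, mystep, keep_not_plus tok htok, pvScan, flushE]
    · simp [mysplit, pvScan]
  | cons c cs ih =>
    intro tok inc exc htok
    obtain ⟨h, t, hht⟩ := mysplit_cons '-' cs
    obtain ⟨hh, ht, hhht⟩ := mysplit_cons '+' h
    by_cases hplus : c = '+'
    · subst hplus
      have e1 : mysplit '-' ('+' :: cs) = ('+' :: h) :: t := by simp [mysplit, hht]
      constructor
      · have e2 : mysplit '+' (tok ++ '+' :: h) = tok :: hh :: ht := by
          rw [mysplit_append '+' tok _ (keep_not_plus tok htok)]
          simp [mysplit, hhht]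
        have hpart : '+' ∈ tok ++ '+' :: h := by simp
        have ih2 := (ih [] inc (flushE exc tok) (by simp)).2
        rw [hht] at ih2
        simp only [List.headD_cons, List.tail_cons, hhht, List.modifyHead, List.nil_append] at ih2
        simp only [e1, List.modifyHead, List.foldl_cons, mystep, if_pos hpart, e2,
          List.headD_cons, List.tail_cons, pvScan, flushE]
        simpa [flushE] using ih2
      · have e3 : mysplit '+' ('+' :: h) = [] :: hh :: ht := by simp [mysplit, hhht]
        have ih2 := (ih [] (inc ++ [String.ofList tok]) exc (by simp)).2
        rw [hht] at ih2
        simp only [List.headD_cons, List.tail_cons, hhht, List.modifyHead, List.nil_append] at ih2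
        simp only [e1, List.headD_cons, List.tail_cons, e3, List.modifyHead, List.map_cons, pvScan]
        simpa [List.append_assoc] using ih2
    · by_cases hminus : c = '-'
      · subst hminus
        have e1 : mysplit '-' ('-' :: cs) = [] :: h :: t := by simp [mysplit, hht]
        constructor
        · have ih1 := (ih [] inc (flushE exc tok) (by simp)).1
          rw [hht] at ih1
          simp only [List.modifyHead, List.nil_append] at ih1
          simp only [e1, List.modifyHead, List.append_nil]
          rw [List.foldl_cons]
          have hstep : mystep (inc, exc) tok = (inc, flushE exc tok) := by
            simp [mystep, keep_not_plus tok htok]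
          rw [hstep]
          rw [show pvScan ('-' :: cs) tok true inc exc
                = pvScan cs [] true inc (flushE exc tok) from by simp [pvScan, flushE]]
          exact ih1
        · have ih1 := (ih [] (inc ++ [String.ofList tok]) exc (by simp)).1
          rw [hht] at ih1
          simp only [List.modifyHead, List.nil_append] at ih1
          rw [e1]
          simp only [List.headD_cons, List.tail_cons]
          rw [show mysplit '+' [] = [[]] from rfl]
          simp only [List.modifyHead, List.append_nil, List.map_cons, List.map_nil]
          rw [show pvScan ('-' :: cs) tok false inc exc
                = pvScan cs [] true (inc ++ [String.ofList tok]) exc from by simp [pvScan]]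
          exact ih1
      · have hkc : pvKeep c = true := by simp [pvKeep, hplus, hminus]
        have hcond : (c == '+' || c == '-') = false := by simp [hplus, hminus]
        have htok' : ∀ x ∈ tok ++ [c], pvKeep x = true := by
          intro x hx
          rcases List.mem_append.1 hx with hx | hx
          · exact htok x hx
          · simp at hx; subst hx; exact hkc
        have e1 : mysplit '-' (c :: cs) = (c :: h) :: t := by simp [mysplit, hminus, hht]
        constructor
        · have ih1 := (ih (tok ++ [c]) inc exc htok').1
          rw [hht] at ih1
          simp only [List.modifyHead] at ih1
          simp only [e1, List.modifyHead, pvScan, hcond]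
          simpa [List.append_assoc] using ih1
        · have e2 : mysplit '+' (c :: h) = (c :: hh) :: ht := by simp [mysplit, hplus, hhht]
          have ih2 := (ih (tok ++ [c]) inc exc htok').2
          rw [hht] at ih2
          simp only [List.headD_cons, List.tail_cons, hhht, List.modifyHead] at ih2
          simp only [e1, List.headD_cons, List.tail_cons, e2, List.modifyHead, pvScan, hcond]
          simpa [List.append_assoc] using ih2

-- bridge between A's head-handling (append first_str, then split the rest) and B's uniform scan
theorem top_bridge (cs : List Char) : ∀ f : List Char, '+' ∉ f → '-' ∉ f →
    List.foldl mystep ([String.ofList (f ++ cs.takeWhile pvKeep)], []) (mysplit '-' (cs.dropWhile pvKeep))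
      = List.foldl mystep
          (((mysplit '+' ((mysplit '-' cs).headD [])).modifyHead (f ++ ·)).map String.ofList, [])
          ((mysplit '-' cs).tail) := by
  induction cs with
  | nil =>
    intro f _ _
    simp [mysplit, mystep, flushE]
  | cons c cs ih =>
    intro f hfp hfm
    obtain ⟨h, t, hht⟩ := mysplit_cons '-' cs
    obtain ⟨hh, ht, hhht⟩ := mysplit_cons '+' h
    by_cases hkc : pvKeep c = true
    · have hcp : c ≠ '+' := by intro e; simp [pvKeep, e] at hkc
      have hcm : c ≠ '-' := by intro e; simp [pvKeep, e] at hkc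
      have e1 : mysplit '-' (c :: cs) = (c :: h) :: t := by simp [mysplit, hcm, hht]
      have e2 : mysplit '+' (c :: h) = (c :: hh) :: ht := by simp [mysplit, hcp, hhht]
      have ihx := ih (f ++ [c]) (by simp [hfp, Ne.symm hcp])
        (by simp [hfm, Ne.symm hcm])
      rw [hht] at ihx
      simp only [List.headD_cons, List.tail_cons, hhht, List.modifyHead] at ihx
      rw [List.takeWhile_cons_of_pos hkc, List.dropWhile_cons_of_pos hkc]
      rw [e1]
      simp only [List.headD_cons, List.tail_cons, e2, List.modifyHead]
      simpa [List.append_assoc] using ihx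
    · have hcd : c = '+' ∨ c = '-' := by
        by_cases h1 : c = '+'
        · exact Or.inl h1
        · right
          by_cases h2 : c = '-'
          · exact h2
          · exact absurd (by simp [pvKeep, h1, h2]) hkc
      have hkf : pvKeep c = false := by simpa using hkc
      rw [List.takeWhile_cons_of_neg (by simp [hkf]), List.dropWhile_cons_of_neg (by simp [hkf])]
      rcases hcd with hcd | hcd
      · subst hcd
        have e1 : mysplit '-' ('+' :: cs) = ('+' :: h) :: t := by simp [mysplit, hht]
        have e2 : mysplit '+' ('+' :: h) = [] :: hh :: ht := by simp [mysplit, hhht]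
        rw [e1]
        simp only [List.headD_cons, List.tail_cons, e2, List.modifyHead, List.append_nil,
          List.map_cons, List.foldl_cons]
        have hstep : mystep ([String.ofList f], []) ('+' :: h)
            = ([String.ofList f] ++ (List.map String.ofList (hh :: ht)), []) := by
          simp [mystep, e2, flushE]
        rw [hstep]
        simp
      · subst hcd
        have e1 : mysplit '-' ('-' :: cs) = [] :: h :: t := by simp [mysplit, hht]
        rw [e1]
        simp only [List.headD_cons, List.tail_cons, List.foldl_cons]
        rw [show mysplit '+' [] = [[]] from rfl]
        simp [mystep, flushE, List.modifyHead]

-- ===== VERDICT (by name: the statement is the Claim_ definition above) =====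
theorem parse_search_terms_spec : Claim_equal_parse_search_terms := by
  intro s _
  unfold Spec_parse_search_terms parse_search_terms parse_search_terms_alt
  by_cases hs : s = ""
  · simp [hs]
  · simp only [if_neg hs]
    rw [phase1_spec s.toList []]
    simp only [List.nil_append]
    rw [splitOn_eq, partStep_eq]
    have h1 := top_bridge s.toList [] (by simp) (by simp)
    simp only [List.nil_append] at h1
    rw [h1]
    have h2 := (scanEI s.toList [] [] [] (by simp)).2
    simpa using h2
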